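-- pv_equiv track=rewrite | github.com/smrik/ai-fund | src/stage_03_judgment/qoe_signals.py | _composite_score
-- ===== SOURCE A (Python) =====
-- def _composite_score(signal_scores: dict[str, str]) -> tuple[int, str]:
--     """
--     Convert per-signal scores into composite QoE score (1–5) and flag.
--
--     Rules (per spec §3.7):
--       5 : 0 reds, 0 ambers
--       4 : 0 reds, 1 amber
--       3 : 0 reds 2+ ambers  OR  1 red
--       2 : 2 reds             OR  4+ ambers
--       1 : 3+ reds
--
--     Flag: score 4-5 → green | score 3 → amber | score 1-2 → red
--     Unavailable signals are excluded from red/amber counts.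
--     """
--     countable = {k: v for k, v in signal_scores.items() if v in {"green", "amber", "red"}}
--     n_red = sum(1 for v in countable.values() if v == "red")
--     n_amber = sum(1 for v in countable.values() if v == "amber")
--
--     if n_red >= 3:
--         score = 1
--     elif n_red == 2 or n_amber >= 4:
--         score = 2
--     elif n_red == 1 or n_amber >= 2:
--         score = 3
--     elif n_amber == 1:
--         score = 4
--     else:
--         score = 5
--
--     flag = "green" if score >= 4 else ("amber" if score == 3 else "red")
--     return score, flag
-- ===== SOURCE B (Python) =====
-- def _composite_score(signal_scores: dict[str, str]) -> tuple[int, str]: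
--     # One counting pass, then two independent per-dimension sub-scores combined by min.
--     n_red = 0
--     n_amber = 0
--     for v in signal_scores.values():
--         if v == "red":
--             n_red += 1
--         elif v == "amber":
--             n_amber += 1
--     red_score = 5 if n_red == 0 else (3 if n_red == 1 else (2 if n_red == 2 else 1))
--     amber_score = 5 if n_amber == 0 else (4 if n_amber == 1 else (3 if n_amber <= 3 else 2))
--     score = min(red_score, amber_score)
--     flag = "green" if score >= 4 else ("amber" if score == 3 else "red")
--     return score, flag
-- ===== Notes on version B (the rewrite author's own statement) =====
-- stated objective: simpler
-- what changed: Replaces the filtered countable dict plus the single ordered red/amber cascade by one counting pass over the values and two independent per-dimension sub-scores (red_score, amber_score) combined with min.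
import Mathlib
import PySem

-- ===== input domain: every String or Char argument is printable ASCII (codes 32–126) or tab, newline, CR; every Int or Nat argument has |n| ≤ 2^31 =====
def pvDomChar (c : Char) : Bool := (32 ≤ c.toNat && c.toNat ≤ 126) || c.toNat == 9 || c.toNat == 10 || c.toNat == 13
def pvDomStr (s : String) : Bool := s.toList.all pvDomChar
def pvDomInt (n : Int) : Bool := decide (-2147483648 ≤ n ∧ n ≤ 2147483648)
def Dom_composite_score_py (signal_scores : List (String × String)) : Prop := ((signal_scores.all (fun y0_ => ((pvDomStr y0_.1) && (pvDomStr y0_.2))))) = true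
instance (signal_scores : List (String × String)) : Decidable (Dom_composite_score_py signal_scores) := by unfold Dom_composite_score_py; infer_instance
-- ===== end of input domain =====

-- B replaces A's filtered dict + ordered cascade by one counting pass and min of two per-dimension sub-scores (simpler decomposition, same O(n) cost).


-- ===== PORT A =====
-- The assoc list encodes the Python dict argument; PySem.Dict.ofList realises it.
-- The dict comprehension over d.items (keys already unique) is exactly a filter of d.items.
def composite_score_py (signal_scores : List (String × String)) : Int × String :=
  let d := PySem.Dict.ofList signal_scores
  let countable := d.items.filter (fun kv => kv.2 == "green" || kv.2 == "amber" || kv.2 == "red")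
  let n_red : Int := countable.foldl (fun acc kv => if kv.2 == "red" then acc + 1 else acc) 0
  let n_amber : Int := countable.foldl (fun acc kv => if kv.2 == "amber" then acc + 1 else acc) 0
  let score : Int :=
    if n_red ≥ 3 then 1
    else if n_red = 2 ∨ n_amber ≥ 4 then 2
    else if n_red = 1 ∨ n_amber ≥ 2 then 3
    else if n_amber = 1 then 4
    else 5
  let flag := if score ≥ 4 then "green" else if score = 3 then "amber" else "red"
  (score, flag)

-- ===== PORT B =====
def composite_score_py_alt (signal_scores : List (String × String)) : Int × String :=
  let d := PySem.Dict.ofList signal_scores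
  let c := d.values.foldl
    (fun (c : Int × Int) v =>
      if v == "red" then (c.1 + 1, c.2)
      else if v == "amber" then (c.1, c.2 + 1)
      else c) (0, 0)
  let red_score : Int := if c.1 = 0 then 5 else if c.1 = 1 then 3 else if c.1 = 2 then 2 else 1
  let amber_score : Int := if c.2 = 0 then 5 else if c.2 = 1 then 4 else if c.2 ≤ 3 then 3 else 2
  let score := min red_score amber_score
  let flag := if score ≥ 4 then "green" else if score = 3 then "amber" else "red"
  (score, flag)

-- ===== PRECONDITION & SPEC =====
def Spec_composite_score_py (signal_scores : List (String × String)) (out : Int × String) : Prop := out = composite_score_py_alt signal_scores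
instance (signal_scores : List (String × String)) (out : Int × String) : Decidable (Spec_composite_score_py signal_scores out) := by unfold Spec_composite_score_py; infer_instance

-- ===== CLAIM (what is proved, stated in full; the proofs are below) =====
def Claim_equal_composite_score_py : Prop := ∀ (signal_scores : List (String × String)), Dom_composite_score_py signal_scores → Spec_composite_score_py signal_scores (composite_score_py signal_scores)

-- ===== LEMMAS AND PROOFS =====

-- a conditional +1 fold counts the matching elements
theorem pv_foldl_count {α : Type} (p : α → Bool) (l : List α) (acc : Int) :
    l.foldl (fun a x => if p x then a + 1 else a) acc = acc + (l.countP p : Int) := by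
  induction l generalizing acc with
  | nil => simp
  | cons x xs ih =>
    by_cases h : p x <;> simp [List.foldl_cons, List.countP_cons, h, ih] <;> ring

-- the paired fold counts reds and ambers simultaneously
theorem pv_foldl_pair (l : List String) (a b : Int) :
    l.foldl (fun (c : Int × Int) v =>
      if v == "red" then (c.1 + 1, c.2)
      else if v == "amber" then (c.1, c.2 + 1)
      else c) (a, b)
    = (a + (l.countP (· == "red") : Int), b + (l.countP (· == "amber") : Int)) := by
  induction l generalizing a b with
  | nil => simp
  | cons x xs ih =>
    rw [List.foldl_cons]
    by_cases hr : (x == "red") = true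
    · have ha : ¬ (x == "amber") = true := by simp_all
      rw [if_pos hr, ih]
      simp only [List.countP_cons, hr, ha, if_true, if_false, Prod.mk.injEq]
      constructor <;> push_cast <;> ring
    · by_cases ha : (x == "amber") = true
      · rw [if_neg hr, if_pos ha, ih]
        simp only [List.countP_cons, hr, ha, if_true, if_false, Prod.mk.injEq]
        constructor <;> push_cast <;> ring
      · rw [if_neg hr, if_neg ha, ih]
        simp only [List.countP_cons, hr, ha, if_false, Prod.mk.injEq]
        constructor <;> push_cast <;> ring

-- the cascade score equals the min of the two sub-scores, and hence so do the (score, flag) pairs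
theorem pv_score_eq (nr na : ℕ) :
    (((if (nr : Int) ≥ 3 then 1
       else if (nr : Int) = 2 ∨ (na : Int) ≥ 4 then 2
       else if (nr : Int) = 1 ∨ (na : Int) ≥ 2 then 3
       else if (na : Int) = 1 then 4
       else 5 : Int),
      (if (if (nr : Int) ≥ 3 then 1
       else if (nr : Int) = 2 ∨ (na : Int) ≥ 4 then 2
       else if (nr : Int) = 1 ∨ (na : Int) ≥ 2 then 3
       else if (na : Int) = 1 then 4
       else 5 : Int) ≥ 4 then "green"
       else if (if (nr : Int) ≥ 3 then 1
       else if (nr : Int) = 2 ∨ (na : Int) ≥ 4 then 2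
       else if (nr : Int) = 1 ∨ (na : Int) ≥ 2 then 3
       else if (na : Int) = 1 then 4
       else 5 : Int) = 3 then "amber" else "red")) : Int × String)
    = ((min (if (nr : Int) = 0 then 5 else if (nr : Int) = 1 then 3 else if (nr : Int) = 2 then 2 else 1)
            (if (na : Int) = 0 then 5 else if (na : Int) = 1 then 4 else if (na : Int) ≤ 3 then 3 else 2),
       (if (min (if (nr : Int) = 0 then 5 else if (nr : Int) = 1 then 3 else if (nr : Int) = 2 then 2 else 1)
            (if (na : Int) = 0 then 5 else if (na : Int) = 1 then 4 else if (na : Int) ≤ 3 then 3 else 2) : Int) ≥ 4 then "green"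
        else if (min (if (nr : Int) = 0 then 5 else if (nr : Int) = 1 then 3 else if (nr : Int) = 2 then 2 else 1)
            (if (na : Int) = 0 then 5 else if (na : Int) = 1 then 4 else if (na : Int) ≤ 3 then 3 else 2) : Int) = 3 then "amber" else "red"))) := by
  have h : (if (nr : Int) ≥ 3 then 1
       else if (nr : Int) = 2 ∨ (na : Int) ≥ 4 then 2
       else if (nr : Int) = 1 ∨ (na : Int) ≥ 2 then 3
       else if (na : Int) = 1 then 4
       else 5 : Int)
      = min (if (nr : Int) = 0 then 5 else if (nr : Int) = 1 then 3 else if (nr : Int) = 2 then 2 else 1)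
            (if (na : Int) = 0 then 5 else if (na : Int) = 1 then 4 else if (na : Int) ≤ 3 then 3 else 2) := by
    have h0r : (0 : Int) ≤ (nr : Int) := Int.natCast_nonneg nr
    have h0a : (0 : Int) ≤ (na : Int) := Int.natCast_nonneg na
    simp only [min_def]
    split_ifs <;> omega
  rw [h]

-- ===== VERDICT (by name: the statement is the Claim_ definition above) =====
theorem composite_score_py_spec : Claim_equal_composite_score_py := by
  intro signal_scores _
  unfold Spec_composite_score_py composite_score_py composite_score_py_alt
  simp only [PySem.Dict.values, pv_foldl_count, pv_foldl_pair, List.countP_map, Function.comp_def, zero_add]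
  have hred : ((PySem.Dict.ofList signal_scores).items.filter
        (fun kv => kv.2 == "green" || kv.2 == "amber" || kv.2 == "red")).countP
        (fun kv => kv.2 == "red")
      = (PySem.Dict.ofList signal_scores).items.countP (fun kv => kv.2 == "red") := by
    rw [List.countP_filter]
    exact List.countP_congr (fun kv _ => by by_cases h : kv.2 == "red" <;> simp [h])
  have hamber : ((PySem.Dict.ofList signal_scores).items.filter
        (fun kv => kv.2 == "green" || kv.2 == "amber" || kv.2 == "red")).countP
        (fun kv => kv.2 == "amber")
      = (PySem.Dict.ofList signal_scores).items.countP (fun kv => kv.2 == "amber") := by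
    rw [List.countP_filter]
    exact List.countP_congr (fun kv _ => by by_cases h : kv.2 == "amber" <;> simp [h])
  rw [hred, hamber]
  exact pv_score_eq _ _
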